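-- pv_equiv track=rewrite | github.com/TheCeco/Tic-Tac-Toe | tic-tac-toe-console_game.py | get_position_mapping
-- ===== SOURCE A (Python) =====
-- def get_position_mapping(board):
--     result = {}
--     idx = 1
--     for row in range(len(board)):
--         for col in range(len(board)):
--             result[idx] = (row, col)
--             idx += 1
--     return result
-- ===== SOURCE B (Python) =====
-- def get_position_mapping(board):
--     n = len(board)
--     # template: the first row's block of the mapping
--     block = {k: (0, k - 1) for k in range(1, n + 1)}
--     result = {}
--     for _ in range(n):
--         result.update(block)
--         # next row's block = previous block translated by (key+n, row+1)
--         block = {k + n: (r + 1, c) for k, (r, c) in block.items()}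
--     return result
-- ===== Notes on version B (the rewrite author's own statement) =====
-- stated objective: alternative
-- what changed: Instead of enumerating all n*n cells with nested loops and an idx counter, B builds only the first row's block as a template and derives each subsequent row's block by translating the previous one (key += n, row += 1), merging the blocks into the result.
import Mathlib
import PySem

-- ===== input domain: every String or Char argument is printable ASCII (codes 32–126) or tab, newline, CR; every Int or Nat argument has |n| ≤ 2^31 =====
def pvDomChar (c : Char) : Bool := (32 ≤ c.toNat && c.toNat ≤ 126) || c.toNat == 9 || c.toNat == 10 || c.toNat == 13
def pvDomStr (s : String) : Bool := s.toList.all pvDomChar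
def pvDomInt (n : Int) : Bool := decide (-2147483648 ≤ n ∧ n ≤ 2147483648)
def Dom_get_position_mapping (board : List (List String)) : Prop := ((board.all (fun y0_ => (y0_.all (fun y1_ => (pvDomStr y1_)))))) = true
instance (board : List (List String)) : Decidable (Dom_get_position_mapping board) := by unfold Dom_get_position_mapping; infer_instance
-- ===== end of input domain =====

-- B builds only the first row's block of the mapping and derives each further row's
-- block by translating the previous one (key += n, row += 1), merging the blocks;
-- objective: alternative structure (no nested index enumeration).

-- ===== PORT A =====
-- result = {}; idx = 1; for row in range(len(board)): for col in range(len(board)):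
--   result[idx] = (row, col); idx += 1; return result
def get_position_mapping (board : List (List String)) : List (Int × Int × Int) :=
  (((PySem.List.pyRange 0 (board.length : Int) 1).foldl
      (fun (st : PySem.Dict Int (Int × Int) × Int) row =>
        (PySem.List.pyRange 0 (board.length : Int) 1).foldl
          (fun st2 col => (st2.1.insert st2.2 (row, col), st2.2 + 1)) st)
      (PySem.Dict.empty, 1)).1).items

-- ===== PORT B =====
-- n = len(board); block = {k: (0, k - 1) for k in range(1, n + 1)}; result = {}
-- for _ in range(n): result.update(block); block = {k + n: (r + 1, c) for k, (r, c) in block.items()}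
-- return result
-- (each dict comprehension is its insertion loop; result.update(block) inserts block's items)
def get_position_mapping_alt (board : List (List String)) : List (Int × Int × Int) :=
  let n : Int := board.length
  let block0 : PySem.Dict Int (Int × Int) :=
    (PySem.List.pyRange 1 (n + 1) 1).foldl
      (fun d k => d.insert k (0, k - 1)) PySem.Dict.empty
  (((PySem.List.pyRange 0 n 1).foldl
      (fun (st : PySem.Dict Int (Int × Int) × PySem.Dict Int (Int × Int)) _ =>
        (st.2.items.foldl (fun d p => d.insert p.1 p.2) st.1,
         st.2.items.foldl (fun d p => d.insert (p.1 + n) (p.2.1 + 1, p.2.2)) PySem.Dict.empty))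
      (PySem.Dict.empty, block0)).1).items

-- ===== PRECONDITION & SPEC =====
def Spec_get_position_mapping (board : List (List String)) (out : List (Int × Int × Int)) : Prop := out = get_position_mapping_alt board
instance (board : List (List String)) (out : List (Int × Int × Int)) : Decidable (Spec_get_position_mapping board out) := by unfold Spec_get_position_mapping; infer_instance

-- ===== CLAIM (what is proved, stated in full; the proofs are below) =====
def Claim_equal_get_position_mapping : Prop := ∀ (board : List (List String)), Dom_get_position_mapping board → Spec_get_position_mapping board (get_position_mapping board)

-- ===== LEMMAS AND PROOFS =====

-- the canonical flat table with N entries, and row t's block, for board size n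
def pvTab (n N : Nat) : List (Int × Int × Int) :=
  (List.range N).map (fun i : Nat => ((i : Int) + 1, ((i / n : Nat) : Int), ((i % n : Nat) : Int)))
def pvBlock (n t : Nat) : List (Int × Int × Int) :=
  (List.range n).map (fun c : Nat => (((t * n + c : Nat) : Int) + 1, (t : Int), (c : Int)))

lemma pv_dict_eq_items {l : List (Int × Int × Int)} {d : PySem.Dict Int (Int × Int)}
    (h : d.items = l) : d = PySem.Dict.mk l := by cases d; simpa using h

-- ---- A side (as before): the double loop builds the flat-index table ----
lemma pv_inner (row : Int) (n : Nat) :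
    ∀ (l : List (Int × Int × Int)) (k : Int), (∀ p ∈ l, p.1 < k) →
    (PySem.List.pyRange 0 (n : Int) 1).foldl
      (fun (st2 : PySem.Dict Int (Int × Int) × Int) col => (st2.1.insert st2.2 (row, col), st2.2 + 1))
      (PySem.Dict.mk l, k)
    = (PySem.Dict.mk (l ++ (List.range n).map (fun c : Nat => (k + (c : Int), row, (c : Int)))), k + n) := by
  induction n with
  | zero =>
      intro l k h
      rw [show ((0 : Nat) : Int) = 0 from rfl, PySem.List.pyRange_one_eq_nil le_rfl]
      simp
  | succ m ih =>
      intro l k h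
      have hsplit : PySem.List.pyRange 0 ((m : Int) + 1) 1
          = PySem.List.pyRange 0 (m : Int) 1 ++ [(m : Int)] :=
        PySem.List.pyRange_one_succ_right (by exact_mod_cast Nat.zero_le m)
      rw [show (((m + 1 : Nat)) : Int) = (m : Int) + 1 from by push_cast; ring, hsplit,
        List.foldl_append, ih l k h]
      simp only [List.foldl_cons, List.foldl_nil]
      have hnc : (PySem.Dict.mk (l ++ (List.range m).map (fun c : Nat => (k + (c : Int), row, (c : Int))))).contains (k + m) = false := by
        rw [Bool.eq_false_iff]
        intro hc
        rw [PySem.Dict.contains_iff_mem_keys, PySem.Dict.keys_mk] at hc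
        simp only [List.map_append, List.mem_append, List.mem_map, List.map_map,
          Function.comp_apply, List.mem_range] at hc
        rcases hc with h1 | h2
        · obtain ⟨p, hp, hpe⟩ := h1
          have := h p hp; omega
        · obtain ⟨c, hc, hce⟩ := h2
          omega
      rw [pv_dict_eq_items (PySem.Dict.items_insert_of_not_contains _ _ hnc)]
      simp only [Prod.mk.injEq]
      refine ⟨?_, by ring⟩
      rw [List.range_succ, List.map_append, List.append_assoc]
      simp

lemma pv_outer (n : Nat) : ∀ (r : Nat),
    (PySem.List.pyRange 0 (r : Int) 1).foldl
      (fun (st : PySem.Dict Int (Int × Int) × Int) row =>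
        (PySem.List.pyRange 0 (n : Int) 1).foldl
          (fun st2 col => (st2.1.insert st2.2 (row, col), st2.2 + 1)) st)
      (PySem.Dict.empty, 1)
    = (PySem.Dict.mk (pvTab n (r * n)), 1 + ((r * n : Nat) : Int)) := by
  intro r
  induction r with
  | zero =>
      rw [show ((0 : Nat) : Int) = 0 from rfl, PySem.List.pyRange_one_eq_nil le_rfl]
      simp [PySem.Dict.empty, pvTab]
  | succ m ih =>
      have hsplit : PySem.List.pyRange 0 ((m : Int) + 1) 1
          = PySem.List.pyRange 0 (m : Int) 1 ++ [(m : Int)] :=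
        PySem.List.pyRange_one_succ_right (by exact_mod_cast Nat.zero_le m)
      rw [show (((m + 1 : Nat)) : Int) = (m : Int) + 1 from by push_cast; ring, hsplit,
        List.foldl_append, ih]
      simp only [List.foldl_cons, List.foldl_nil]
      rw [pv_inner (m : Int) n _ _ (by
        intro p hp
        simp only [pvTab, List.mem_map, List.mem_range] at hp
        obtain ⟨i, hi, hie⟩ := hp
        have : p.1 = (i : Int) + 1 := by rw [← hie]
        omega)]
      simp only [Prod.mk.injEq]
      refine ⟨?_, by push_cast; ring⟩
      congr 1
      simp only [pvTab]
      rw [Nat.succ_mul, List.range_add, List.map_append, List.map_map]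
      congr 1
      apply List.map_congr_left
      intro c hc
      simp only [List.mem_range] at hc
      simp only [Function.comp_apply]
      have h1 : (m * n + c) / n = m := by
        have hn : 0 < n := by omega
        rw [Nat.add_comm, Nat.add_mul_div_right _ _ hn, Nat.div_eq_of_lt hc, Nat.zero_add]
      have h2 : (m * n + c) % n = c := by
        rw [Nat.mul_add_mod']
        exact Nat.mod_eq_of_lt (by omega)
      rw [h1, h2]
      push_cast
      ring_nf

-- ---- B side ----

-- the initial comprehension builds row 0's block
lemma pv_block0 (n : Nat) :
    (PySem.List.pyRange 1 ((n : Int) + 1) 1).foldl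
      (fun (d : PySem.Dict Int (Int × Int)) k => d.insert k (0, k - 1)) PySem.Dict.empty
    = PySem.Dict.mk (pvBlock n 0) := by
  rw [PySem.List.pyRange_one]
  have hlen : (((n : Int) + 1) - 1).toNat = n := by omega
  rw [hlen]
  rw [PySem.Dict.items_foldl_insert_fresh (k := fun a => a) (v := fun a => (0, a - 1))
        ((List.range n).map (fun k : Nat => (1 : Int) + k)) PySem.Dict.empty
        (by intro a _; exact PySem.Dict.contains_empty a)
        (by
          rw [List.map_id']
          refine List.Nodup.map ?_ (List.nodup_range)
          intro x y hxy
          have : (1 : Int) + x = 1 + y := hxy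
          omega) |> pv_dict_eq_items]
  apply PySem.Dict.ext
  simp only [PySem.Dict.empty, List.nil_append, List.map_map,
    pvBlock]
  apply List.map_congr_left
  intro c _
  simp only [Function.comp_apply, Prod.mk.injEq]
  refine ⟨by push_cast; ring, by simp, by omega⟩

-- translating a block gives the next row's block
lemma pv_block_step (n t : Nat) :
    (pvBlock n t).foldl
      (fun (d : PySem.Dict Int (Int × Int)) p => d.insert (p.1 + (n : Int)) (p.2.1 + 1, p.2.2))
      PySem.Dict.empty
    = PySem.Dict.mk (pvBlock n (t + 1)) := by
  rw [PySem.Dict.items_foldl_insert_fresh (k := fun p => p.1 + (n : Int))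
        (v := fun p => (p.2.1 + 1, p.2.2)) (pvBlock n t) PySem.Dict.empty
        (by intro a _; exact PySem.Dict.contains_empty _)
        (by
          simp only [pvBlock, List.map_map]
          refine List.Nodup.map ?_ (List.nodup_range)
          intro x y hxy
          simp only [Function.comp_apply] at hxy
          omega) |> pv_dict_eq_items]
  apply PySem.Dict.ext
  simp only [PySem.Dict.empty, List.nil_append, List.map_map, pvBlock]
  apply List.map_congr_left
  intro c _
  simp only [Function.comp_apply, Prod.mk.injEq]
  refine ⟨by push_cast; ring, by simp, by simp⟩

-- merging row t's block into the table extends it by one row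
lemma pv_update_step (n t : Nat) :
    (pvBlock n t).foldl
      (fun (d : PySem.Dict Int (Int × Int)) p => d.insert p.1 p.2)
      (PySem.Dict.mk (pvTab n (t * n)))
    = PySem.Dict.mk (pvTab n ((t + 1) * n)) := by
  rw [PySem.Dict.items_foldl_insert_fresh (k := fun p : Int × Int × Int => p.1)
        (v := fun p => p.2) (pvBlock n t) (PySem.Dict.mk (pvTab n (t * n)))
        (by
          intro a ha
          simp only [pvBlock, List.mem_map, List.mem_range] at ha
          obtain ⟨c, hc, rfl⟩ := ha
          rw [Bool.eq_false_iff]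
          intro hcon
          rw [PySem.Dict.contains_iff_mem_keys, PySem.Dict.keys_mk] at hcon
          simp only [pvTab, List.map_map, List.mem_map, List.mem_range,
            Function.comp_apply] at hcon
          obtain ⟨i, hi, hie⟩ := hcon
          omega)
        (by
          simp only [pvBlock, List.map_map]
          refine List.Nodup.map ?_ (List.nodup_range)
          intro x y hxy
          simp only [Function.comp_apply] at hxy
          omega) |> pv_dict_eq_items]
  apply PySem.Dict.ext
  simp only [Prod.mk.eta]
  simp only [pvTab, pvBlock]
  rw [Nat.succ_mul, List.range_add, List.map_append]
  congr 1
  rw [List.map_map]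
  apply List.ext_getElem (by simp)
  intro i hi1 hi2
  simp only [List.getElem_map, Function.comp_apply, List.getElem_range]
  have hc : i < n := by simpa using hi1
  have h1 : (t * n + i) / n = t := by
    have hn : 0 < n := by omega
    rw [Nat.add_comm, Nat.add_mul_div_right _ _ hn, Nat.div_eq_of_lt hc, Nat.zero_add]
  have h2 : (t * n + i) % n = i := by
    rw [Nat.mul_add_mod']
    exact Nat.mod_eq_of_lt (by omega)
  rw [h1, h2]

-- B's loop invariant: after t iterations the result holds t rows and block is row t
lemma pv_b_loop (n : Nat) : ∀ (t : Nat),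
    (PySem.List.pyRange 0 (t : Int) 1).foldl
      (fun (st : PySem.Dict Int (Int × Int) × PySem.Dict Int (Int × Int)) _ =>
        (st.2.items.foldl (fun d p => d.insert p.1 p.2) st.1,
         st.2.items.foldl (fun d p => d.insert (p.1 + (n : Int)) (p.2.1 + 1, p.2.2)) PySem.Dict.empty))
      (PySem.Dict.empty, PySem.Dict.mk (pvBlock n 0))
    = (PySem.Dict.mk (pvTab n (t * n)), PySem.Dict.mk (pvBlock n t)) := by
  intro t
  induction t with
  | zero =>
      rw [show ((0 : Nat) : Int) = 0 from rfl, PySem.List.pyRange_one_eq_nil le_rfl]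
      simp [PySem.Dict.empty, pvTab]
  | succ m ih =>
      have hsplit : PySem.List.pyRange 0 ((m : Int) + 1) 1
          = PySem.List.pyRange 0 (m : Int) 1 ++ [(m : Int)] :=
        PySem.List.pyRange_one_succ_right (by exact_mod_cast Nat.zero_le m)
      rw [show (((m + 1 : Nat)) : Int) = (m : Int) + 1 from by push_cast; ring, hsplit,
        List.foldl_append, ih]
      simp only [List.foldl_cons, List.foldl_nil]
      rw [pv_update_step, pv_block_step]

-- ===== VERDICT (by name: the statement is the Claim_ definition above) =====
theorem get_position_mapping_spec : Claim_equal_get_position_mapping := by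
  intro board _
  simp only [Spec_get_position_mapping, get_position_mapping, get_position_mapping_alt]
  rw [pv_outer board.length board.length, pv_block0 board.length, pv_b_loop board.length board.length]
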